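-- pv_equiv track=rewrite | github.com/segorucu/Leetcode | 1621-number-of-subsequences-that-satisfy-the-given-sum-condition/number-of-subsequences-that-satisfy-the-given-sum-condition.py | numSubseq
-- ===== SOURCE A (Python) =====
-- from typing import List
--
-- def numSubseq(nums: List[int], target: int) -> int:
--
--     nums.sort()
--     MOD = 10**9+7
--
--     n = len(nums)
--     l = 0
--     r = n-1
--     ans = 0
--     while l <= r:
--         while l <= r and nums[l] + nums[r] > target:
--             r -= 1
--             if r < l:
--                 break
--         if r < l:
--             break
--         size = r-l
--         ans += pow(2,size,MOD)
--         ans = ans % MOD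
--         l += 1
--
--     return ans
-- ===== SOURCE B (Python) =====
-- def numSubseq(nums, target):
--     nums.sort()
--     MOD = 10**9 + 7
--     n = len(nums)
--     ans = 0
--     for l in range(n):
--         # rightmost index whose value keeps nums[l] + nums[r] <= target,
--         # via a hand-written bisect_right (upper-bound binary search)
--         x = target - nums[l]
--         lo, hi = 0, n
--         while lo < hi:
--             mid = (lo + hi) // 2
--             if x < nums[mid]:
--                 hi = mid
--             else:
--                 lo = mid + 1
--         r = lo - 1
--         if r >= l:
--             ans = (ans + pow(2, r - l, MOD)) % MOD
--     return ans
-- ===== Notes on version B (the rewrite author's own statement) =====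
-- stated objective: alternative
-- what changed: Replaces A's monotone two-pointer sweep (with nested shrink loop and early break) by an independent hand-written bisect_right binary search per left index, adding pow(2, r-l, MOD) whenever the found right bound r >= l.
import Mathlib
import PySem

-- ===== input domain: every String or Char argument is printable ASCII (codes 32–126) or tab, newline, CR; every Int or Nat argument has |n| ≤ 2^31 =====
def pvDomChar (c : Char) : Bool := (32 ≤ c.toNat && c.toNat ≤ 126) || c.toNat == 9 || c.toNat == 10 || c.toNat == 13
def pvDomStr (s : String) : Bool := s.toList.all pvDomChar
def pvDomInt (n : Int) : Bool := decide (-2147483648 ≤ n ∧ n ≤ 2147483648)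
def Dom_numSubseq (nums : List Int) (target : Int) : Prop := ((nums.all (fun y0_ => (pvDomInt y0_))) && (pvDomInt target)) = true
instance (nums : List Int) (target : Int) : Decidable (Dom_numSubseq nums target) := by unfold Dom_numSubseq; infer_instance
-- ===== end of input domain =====

-- B replaces A's two-pointer sweep by an independent binary search per left index (same cost class).
-- Both Pythons sort the argument in place; the equivalence proved here is about the return value.

-- ===== PORT A =====
-- inner 'while l <= r and nums[l] + nums[r] > target: r -= 1; if r < l: break' loop.
-- Indices are always in range at every reachable state, so nums[l]/nums[r] is exact as pyGetD _ _ 0.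
def numSubseqInner (s : List Int) (target l r : Int) : Int :=
  if h : l ≤ r ∧ target < PySem.List.pyGetD s l 0 + PySem.List.pyGetD s r 0 then
    if h2 : r - 1 < l then r - 1
    else numSubseqInner s target l (r - 1)
  else r
termination_by (r - l + 1).toNat
decreasing_by omega

-- the inner loop never increases r (cited by numSubseqOuter's decreasing_by)
theorem numSubseqInner_le (s : List Int) (target l r : Int) :
    numSubseqInner s target l r ≤ r := by
  unfold numSubseqInner
  split_ifs with h h2
  · omega
  · have := numSubseqInner_le s target l (r - 1); omega
  · omega
termination_by (r - l + 1).toNat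
decreasing_by omega

-- outer 'while l <= r' loop; A's local r' names the value of r after the inner loop (inlined here)
def numSubseqOuter (s : List Int) (target l r ans : Int) : Int :=
  if _h : l ≤ r then
    if numSubseqInner s target l r < l then ans
    else numSubseqOuter s target (l + 1) (numSubseqInner s target l r)
          (PySem.Int.mod (ans + PySem.Int.powMod 2 (numSubseqInner s target l r - l).toNat 1000000007) 1000000007)
  else ans
termination_by (r - l + 2).toNat
decreasing_by
  have := numSubseqInner_le s target l r
  omega

def numSubseq (nums : List Int) (target : Int) : Int :=
  let s := PySem.List.sorted nums (fun x => x) false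
  numSubseqOuter s target 0 ((s.length : Int) - 1) 0

-- ===== PORT B =====
-- Source B's hand-written bisect_right: 'while lo < hi: mid = (lo+hi)//2; ...' (mid inlined)
def numSubseqBisect (s : List Int) (x lo hi : Int) : Int :=
  if h : lo < hi then
    if x < PySem.List.pyGetD s (PySem.Int.floordiv (lo + hi) 2) 0 then
      numSubseqBisect s x lo (PySem.Int.floordiv (lo + hi) 2)
    else numSubseqBisect s x (PySem.Int.floordiv (lo + hi) 2 + 1) hi
  else lo
termination_by (hi - lo).toNat
decreasing_by
  · have _hm := (PySem.Int.floordiv_two_mid_bounds (le_of_lt h)).1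
    have _hlt : PySem.Int.floordiv (lo + hi) 2 < hi :=
      (PySem.Int.floordiv_lt_iff_lt_mul (by omega : (0:Int) < 2)).2 (by omega)
    omega
  · have _hm := (PySem.Int.floordiv_two_mid_bounds (le_of_lt h)).1
    have _hlt : PySem.Int.floordiv (lo + hi) 2 < hi :=
      (PySem.Int.floordiv_lt_iff_lt_mul (by omega : (0:Int) < 2)).2 (by omega)
    omega

-- per-iteration body of Source B's for-loop; Source B's local r = (bisect result) - 1 is inlined
def numSubseq_alt (nums : List Int) (target : Int) : Int :=
  let s := PySem.List.sorted nums (fun x => x) false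
  (PySem.List.pyRange 0 (s.length : Int) 1).foldl (fun ans l =>
      if numSubseqBisect s (target - PySem.List.pyGetD s l 0) 0 (s.length : Int) - 1 ≥ l then
        PySem.Int.mod (ans + PySem.Int.powMod 2
          (numSubseqBisect s (target - PySem.List.pyGetD s l 0) 0 (s.length : Int) - 1 - l).toNat
          1000000007) 1000000007
      else ans) 0

-- ===== PRECONDITION & SPEC =====
def Spec_numSubseq (nums : List Int) (target : Int) (out : Int) : Prop := out = numSubseq_alt nums target
instance (nums : List Int) (target : Int) (out : Int) : Decidable (Spec_numSubseq nums target out) := by unfold Spec_numSubseq; infer_instance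

-- ===== CLAIM (what is proved, stated in full; the proofs are below) =====
def Claim_equal_numSubseq : Prop := ∀ (nums : List Int) (target : Int), Dom_numSubseq nums target → Spec_numSubseq nums target (numSubseq nums target)

-- ===== LEMMAS AND PROOFS =====

-- B's loop body, named for the proofs (definitionally the lambda inside numSubseq_alt)
def bstep (s : List Int) (target ans l : Int) : Int :=
  if numSubseqBisect s (target - PySem.List.pyGetD s l 0) 0 (s.length : Int) - 1 ≥ l then
    PySem.Int.mod (ans + PySem.Int.powMod 2
      (numSubseqBisect s (target - PySem.List.pyGetD s l 0) 0 (s.length : Int) - 1 - l).toNat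
      1000000007) 1000000007
  else ans

-- sortedness phrased over Int indices and pyGetD
def SortedG (s : List Int) : Prop :=
  ∀ i j : Int, 0 ≤ i → i ≤ j → j < (s.length : Int) →
    PySem.List.pyGetD s i 0 ≤ PySem.List.pyGetD s j 0

theorem sortedG_sorted (nums : List Int) : SortedG (PySem.List.sorted nums (fun x => x) false) := by
  intro i j h0 hij hj
  have hlen : ((PySem.List.sorted nums (fun x => x) false).length : Int) = (nums.length : Int) := by
    simp [PySem.List.length_sorted]
  rw [PySem.List.pyGetD_eq_getElem _ _ h0 (by omega), PySem.List.pyGetD_eq_getElem _ _ (by omega) hj]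
  exact PySem.List.sorted_id_getElem_mono nums (by omega) (by omega)

-- basic bounds of the binary search
theorem bisect_bounds (s : List Int) (x lo hi : Int) (hlh : lo ≤ hi) :
    lo ≤ numSubseqBisect s x lo hi ∧ numSubseqBisect s x lo hi ≤ hi := by
  unfold numSubseqBisect
  split_ifs with h h2
  · have hm := PySem.Int.floordiv_two_mid_bounds (le_of_lt h)
    have := bisect_bounds s x lo (PySem.Int.floordiv (lo + hi) 2) hm.1
    omega
  · have hm := PySem.Int.floordiv_two_mid_bounds (le_of_lt h)
    have h2' : PySem.Int.floordiv (lo + hi) 2 < hi :=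
      (PySem.Int.floordiv_lt_iff_lt_mul (by omega : (0:Int) < 2)).2 (by omega)
    have := bisect_bounds s x (PySem.Int.floordiv (lo + hi) 2 + 1) hi (by omega)
    omega
  · omega
termination_by (hi - lo).toNat
decreasing_by
  · have _hm := (PySem.Int.floordiv_two_mid_bounds (le_of_lt h)).1
    have _hlt : PySem.Int.floordiv (lo + hi) 2 < hi :=
      (PySem.Int.floordiv_lt_iff_lt_mul (by omega : (0:Int) < 2)).2 (by omega)
    omega
  · have _hm := (PySem.Int.floordiv_two_mid_bounds (le_of_lt h)).1
    have _hlt : PySem.Int.floordiv (lo + hi) 2 < hi :=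
      (PySem.Int.floordiv_lt_iff_lt_mul (by omega : (0:Int) < 2)).2 (by omega)
    omega

-- correctness of the binary search on a sorted list: the result splits the indices at x
theorem bisect_spec (s : List Int) (x lo hi : Int)
    (hs : SortedG s) (h0 : 0 ≤ lo) (hn : hi ≤ (s.length : Int)) (hlh : lo ≤ hi)
    (hlow : ∀ i : Int, 0 ≤ i → i < lo → PySem.List.pyGetD s i 0 ≤ x)
    (hhigh : ∀ i : Int, hi ≤ i → i < (s.length : Int) → x < PySem.List.pyGetD s i 0) :
    (∀ i : Int, 0 ≤ i → i < numSubseqBisect s x lo hi → PySem.List.pyGetD s i 0 ≤ x) ∧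
    (∀ i : Int, numSubseqBisect s x lo hi ≤ i → i < (s.length : Int) → x < PySem.List.pyGetD s i 0) := by
  unfold numSubseqBisect
  split_ifs with h hx
  · have hm := PySem.Int.floordiv_two_mid_bounds (le_of_lt h)
    refine bisect_spec s x lo (PySem.Int.floordiv (lo + hi) 2) hs h0 (by omega) hm.1 hlow ?_
    intro i h1 h2
    exact lt_of_lt_of_le hx (hs _ i (by omega) h1 h2)
  · have hm := PySem.Int.floordiv_two_mid_bounds (le_of_lt h)
    have h2' : PySem.Int.floordiv (lo + hi) 2 < hi :=
      (PySem.Int.floordiv_lt_iff_lt_mul (by omega : (0:Int) < 2)).2 (by omega)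
    refine bisect_spec s x (PySem.Int.floordiv (lo + hi) 2 + 1) hi hs (by omega) hn (by omega) ?_ hhigh
    intro i hi0 hilt
    exact le_trans (hs i _ hi0 (by omega) (by omega)) (not_lt.mp hx)
  · exact ⟨fun i hi0 hilt => hlow i hi0 hilt, fun i hge hlt => hhigh i (by omega) hlt⟩
termination_by (hi - lo).toNat
decreasing_by
  · have _hm := (PySem.Int.floordiv_two_mid_bounds (le_of_lt h)).1
    have _hlt : PySem.Int.floordiv (lo + hi) 2 < hi :=
      (PySem.Int.floordiv_lt_iff_lt_mul (by omega : (0:Int) < 2)).2 (by omega)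
    omega
  · have _hm := (PySem.Int.floordiv_two_mid_bounds (le_of_lt h)).1
    have _hlt : PySem.Int.floordiv (lo + hi) 2 < hi :=
      (PySem.Int.floordiv_lt_iff_lt_mul (by omega : (0:Int) < 2)).2 (by omega)
    omega

-- B's per-left-index bound: the rightmost index r with s[l] + s[r] ≤ target (or -1 / n-1 clamped)
def bnd (s : List Int) (target l : Int) : Int :=
  numSubseqBisect s (target - PySem.List.pyGetD s l 0) 0 (s.length : Int) - 1

theorem bnd_bounds (s : List Int) (target l : Int) :
    -1 ≤ bnd s target l ∧ bnd s target l ≤ (s.length : Int) - 1 := by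
  have := bisect_bounds s (target - PySem.List.pyGetD s l 0) 0 (s.length : Int) (by positivity)
  unfold bnd; omega

theorem bnd_spec (s : List Int) (target l : Int) (hs : SortedG s) :
    (∀ i : Int, 0 ≤ i → i ≤ bnd s target l →
        PySem.List.pyGetD s l 0 + PySem.List.pyGetD s i 0 ≤ target) ∧
    (∀ i : Int, bnd s target l < i → i < (s.length : Int) →
        target < PySem.List.pyGetD s l 0 + PySem.List.pyGetD s i 0) := by
  have h := bisect_spec s (target - PySem.List.pyGetD s l 0) 0 (s.length : Int) hs
      (by omega) (by omega) (by positivity) (by omega) (by omega)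
  unfold bnd
  constructor
  · intro i h0 hi; have := h.1 i h0 (by omega); omega
  · intro i h1 h2; have := h.2 i (by omega) h2; omega

theorem bnd_mono (s : List Int) (target l l' : Int) (hs : SortedG s)
    (h0 : 0 ≤ l) (hll : l ≤ l') (hn : l' < (s.length : Int)) :
    bnd s target l' ≤ bnd s target l := by
  by_contra hc
  simp only [not_le] at hc
  have hb := bnd_bounds s target l
  have hb' := bnd_bounds s target l'
  have h1 := (bnd_spec s target l' hs).1 (bnd s target l') (by omega) (by omega)
  have h2 := (bnd_spec s target l hs).2 (bnd s target l') (by omega) (by omega)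
  have h3 := hs l l' h0 hll hn
  omega

-- characterisation of A's inner loop via B's binary-search bound
theorem inner_eq (s : List Int) (target l r : Int) (hs : SortedG s)
    (h0 : 0 ≤ l) (hlr : l ≤ r) (hr : r ≤ (s.length : Int) - 1) (hbr : bnd s target l ≤ r) :
    numSubseqInner s target l r = if l ≤ bnd s target l then bnd s target l else l - 1 := by
  have hsp := bnd_spec s target l hs
  rw [numSubseqInner]
  by_cases h : l ≤ r ∧ target < PySem.List.pyGetD s l 0 + PySem.List.pyGetD s r 0
  · -- loop condition holds: r is past the bound, so bnd ≤ r - 1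
    have hbr1 : bnd s target l < r := by
      by_contra hb; simp only [not_lt] at hb
      exact absurd (hsp.1 r (by omega) (by omega)) (by omega)
    rw [dif_pos h]
    by_cases h2 : r - 1 < l
    · -- break: r = l here, result r - 1 = l - 1; and bnd < r = l
      rw [dif_pos h2, if_neg (by omega)]
      omega
    · rw [dif_neg h2]
      exact inner_eq s target l (r - 1) hs h0 (by omega) (by omega) (by omega)
  · -- loop condition false: s[l] + s[r] ≤ target, so bnd = r and l ≤ bnd
    have hle : PySem.List.pyGetD s l 0 + PySem.List.pyGetD s r 0 ≤ target := by
      rcases not_and_or.mp h with h' | h' <;> omega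
    have hrb : r ≤ bnd s target l := by
      by_contra hb; simp only [not_le] at hb
      exact absurd (hsp.2 r hb (by omega)) (by omega)
    rw [dif_neg h, if_pos (by omega)]
    omega
termination_by (r - l + 1).toNat
decreasing_by omega

-- skipped tail: if every remaining left index is past its bound, B's fold adds nothing
theorem fold_skip (s : List Int) (target l ans : Int)
    (h : ∀ l' : Int, l ≤ l' → l' < (s.length : Int) → bnd s target l' < l') :
    (PySem.List.pyRange l (s.length : Int) 1).foldl (bstep s target) ans = ans := by
  by_cases hl : (s.length : Int) ≤ l
  · rw [PySem.List.pyRange_one_eq_nil hl]; rfl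
  · rw [PySem.List.pyRange_one_cons (by omega)]
    simp only [List.foldl_cons]
    have hb : bstep s target ans l = ans := by
      have := h l (by omega) (by omega)
      unfold bstep; unfold bnd at this
      rw [if_neg (by omega)]
    rw [hb]
    exact fold_skip s target (l + 1) ans (fun l' h1 h2 => h l' (by omega) h2)
termination_by ((s.length : Int) - l).toNat
decreasing_by omega

-- main loop correspondence
theorem outer_eq_fold (s : List Int) (target l r ans : Int) (hs : SortedG s)
    (h0 : 0 ≤ l) (hr : r ≤ (s.length : Int) - 1)
    (hbr : l < (s.length : Int) → bnd s target l ≤ r) :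
    numSubseqOuter s target l r ans =
      (PySem.List.pyRange l (s.length : Int) 1).foldl (bstep s target) ans := by
  rw [numSubseqOuter]
  by_cases hlr : l ≤ r
  · have hln : l < (s.length : Int) := by omega
    have hb : bnd s target l ≤ r := hbr hln
    have hri : numSubseqInner s target l r
        = if l ≤ bnd s target l then bnd s target l else l - 1 :=
      inner_eq s target l r hs h0 hlr hr hb
    rw [dif_pos hlr, hri]
    by_cases hcase : l ≤ bnd s target l
    · rw [if_pos hcase, if_neg (by omega)]
      rw [PySem.List.pyRange_one_cons (by omega)]
      simp only [List.foldl_cons]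
      have hbs : bstep s target ans l
          = PySem.Int.mod (ans + PySem.Int.powMod 2 (bnd s target l - l).toNat 1000000007) 1000000007 := by
        unfold bstep; unfold bnd
        rw [if_pos (by unfold bnd at hcase; omega)]
      rw [hbs]
      have hbb := bnd_bounds s target l
      exact outer_eq_fold s target (l + 1) (bnd s target l) _ hs (by omega) (by omega)
        (fun hln' => bnd_mono s target l (l + 1) hs h0 (by omega) hln')
    · rw [if_neg hcase, if_pos (by omega)]
      exact (fold_skip s target l ans (fun l' h1 h2 => by
        by_cases hl' : l' = l
        · subst hl'; omega
        · have := bnd_mono s target l l' hs h0 (by omega) h2; omega)).symm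
  · rw [dif_neg hlr]
    refine (fold_skip s target l ans (fun l' h1 h2 => ?_)).symm
    have hln : l < (s.length : Int) := by omega
    by_cases hl' : l' = l
    · subst hl'; have := hbr hln; omega
    · have := bnd_mono s target l l' hs h0 (by omega) h2
      have := hbr hln; omega
termination_by ((s.length : Int) - l).toNat
decreasing_by omega

-- ===== VERDICT (by name: the statement is the Claim_ definition above) =====
theorem numSubseq_spec : Claim_equal_numSubseq := by
  intro nums target _
  unfold Spec_numSubseq numSubseq numSubseq_alt
  have hs := sortedG_sorted nums
  have hmain := outer_eq_fold (PySem.List.sorted nums (fun x => x) false) target 0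
      (((PySem.List.sorted nums (fun x => x) false).length : Int) - 1) 0 hs (by omega)
      (by omega)
      (fun _ => by
        have := bnd_bounds (PySem.List.sorted nums (fun x => x) false) target 0
        omega)
  exact hmain
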